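-- pv_equiv track=rewrite | github.com/therooler/jaxmg | src/python/block_cyclic.py | local_block_cyclic_permutation
-- ===== SOURCE A (Python) =====
-- def local_block_cyclic_permutation(shard_cols, T_A, ndev):
--     # Previous padding ensures that both of these are integer
--     nblocks = shard_cols // T_A
--     nblocks_per_device = nblocks // ndev
--     # Build permutation of indices
--     interleaved = []
--     for dev in range(ndev):
--         for block in range(nblocks_per_device):
--             shift = ndev * T_A * block + dev * T_A
--             for i in range(T_A):
--                 idx = shift + i
--                 interleaved.append(idx)
--     return interleaved
-- ===== SOURCE B (Python) =====
-- def local_block_cyclic_permutation(shard_cols, T_A, ndev):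
--     nblocks = shard_cols // T_A
--     nblocks_per_device = nblocks // ndev
--     # Deal the index blocks round-robin into per-device buckets by scanning
--     # blocks in their natural (memory) order, then concatenate the buckets.
--     buckets = [[] for _ in range(ndev)]
--     for block in range(nblocks_per_device):
--         for dev in range(ndev):
--             b = ndev * block + dev
--             buckets[dev].extend(range(b * T_A, b * T_A + T_A))
--     return [i for bucket in buckets for i in bucket]
-- ===== Notes on version B (the rewrite author's own statement) =====
-- stated objective: alternative
-- what changed: Instead of A's triple loop that emits output positions sequentially while computing scattered source indices with shift arithmetic, B scans the blocks in their natural memory order, deals each block's contiguous index range round-robin into per-device bucket lists, and concatenates the buckets at the end.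
import Mathlib
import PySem

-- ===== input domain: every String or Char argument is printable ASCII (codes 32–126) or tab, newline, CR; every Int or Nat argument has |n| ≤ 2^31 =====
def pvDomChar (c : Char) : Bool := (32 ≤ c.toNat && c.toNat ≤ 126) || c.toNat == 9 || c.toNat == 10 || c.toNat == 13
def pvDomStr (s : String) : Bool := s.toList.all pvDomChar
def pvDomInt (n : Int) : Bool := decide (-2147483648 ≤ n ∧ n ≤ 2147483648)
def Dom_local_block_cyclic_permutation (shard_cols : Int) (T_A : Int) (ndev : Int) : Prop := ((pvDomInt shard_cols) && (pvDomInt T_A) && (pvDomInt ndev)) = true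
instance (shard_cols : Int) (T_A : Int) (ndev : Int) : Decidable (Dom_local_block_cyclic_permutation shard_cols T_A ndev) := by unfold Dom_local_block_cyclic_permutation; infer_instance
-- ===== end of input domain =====

-- B replaces A's sequential emission with shift arithmetic by a round-robin deal: it scans the
-- blocks in natural memory order, distributes each block's contiguous range into per-device
-- bucket lists, and concatenates the buckets (alternative decomposition, same cost).

-- ===== PORT A =====
def local_block_cyclic_permutation (shard_cols : Int) (T_A : Int) (ndev : Int) : List Int :=
  let nblocks := PySem.Int.floordiv shard_cols T_A
  let nblocks_per_device := PySem.Int.floordiv nblocks ndev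
  (PySem.List.pyRange 0 ndev 1).foldl (fun interleaved dev =>
    (PySem.List.pyRange 0 nblocks_per_device 1).foldl (fun interleaved block =>
      let shift := ndev * T_A * block + dev * T_A
      (PySem.List.pyRange 0 T_A 1).foldl (fun interleaved i =>
        let idx := shift + i
        interleaved ++ [idx]) interleaved) interleaved) []

-- ===== PORT B =====
def local_block_cyclic_permutation_alt (shard_cols : Int) (T_A : Int) (ndev : Int) : List Int :=
  let nblocks := PySem.Int.floordiv shard_cols T_A
  let nblocks_per_device := PySem.Int.floordiv nblocks ndev
  let buckets : List (List Int) := (PySem.List.pyRange 0 ndev 1).map (fun _ => ([] : List Int))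
  let buckets := (PySem.List.pyRange 0 nblocks_per_device 1).foldl (fun bk block =>
    (PySem.List.pyRange 0 ndev 1).foldl (fun bk dev =>
      let b := ndev * block + dev
      -- buckets[dev].extend(range(b*T_A, b*T_A+T_A)): in-place update at index dev;
      -- exact because here 0 ≤ dev < len(buckets) always holds
      bk.modify dev.toNat (fun l => l ++ PySem.List.pyRange (b * T_A) (b * T_A + T_A) 1)) bk) buckets
  buckets.flatMap (fun bucket => bucket)

-- ===== PRECONDITION & SPEC =====
-- A raises ZeroDivisionError when T_A = 0 or ndev = 0; exactly those inputs are excluded.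
def Pre_local_block_cyclic_permutation (shard_cols : Int) (T_A : Int) (ndev : Int) : Prop :=
  T_A ≠ 0 ∧ ndev ≠ 0
instance (shard_cols : Int) (T_A : Int) (ndev : Int) : Decidable (Pre_local_block_cyclic_permutation shard_cols T_A ndev) := by unfold Pre_local_block_cyclic_permutation; infer_instance
def pvWitness_local_block_cyclic_permutation : Int × Int × Int := (8, 2, 2)
def Spec_local_block_cyclic_permutation (shard_cols : Int) (T_A : Int) (ndev : Int) (out : List Int) : Prop := out = local_block_cyclic_permutation_alt shard_cols T_A ndev
instance (shard_cols : Int) (T_A : Int) (ndev : Int) (out : List Int) : Decidable (Spec_local_block_cyclic_permutation shard_cols T_A ndev out) := by unfold Spec_local_block_cyclic_permutation; infer_instance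

-- ===== CLAIM (what is proved, stated in full; the proofs are below) =====
def Claim_equal_local_block_cyclic_permutation : Prop := ∀ (shard_cols : Int) (T_A : Int) (ndev : Int), Dom_local_block_cyclic_permutation shard_cols T_A ndev → Pre_local_block_cyclic_permutation shard_cols T_A ndev → Spec_local_block_cyclic_permutation shard_cols T_A ndev (local_block_cyclic_permutation shard_cols T_A ndev)

-- ===== LEMMAS AND PROOFS =====

-- modify at an index strictly inside X leaves an appended last element alone
lemma pv_modify_append_lt (X : List (List Int)) (y : List Int) (i : Nat) (h : i < X.length)
    (f : List Int → List Int) : (X ++ [y]).modify i f = X.modify i f ++ [y] := by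
  apply List.ext_getElem (by simp)
  intro j h1 h2
  rcases Nat.lt_or_ge j X.length with hj | hj
  · rw [List.getElem_modify]
    rw [List.getElem_append_left (by simpa using hj), List.getElem_append_left (by simpa using hj)]
    rw [List.getElem_modify]
  · have hij : i ≠ j := by omega
    have hjeq : j = X.length := by simp at h1; omega
    subst hjeq
    rw [List.getElem_modify, if_neg hij]
    rw [List.getElem_append_right (le_refl _), List.getElem_append_right (by simp)]
    simp

-- modify at the position of an appended last element rewrites exactly it
lemma pv_modify_append_last (X : List (List Int)) (y : List Int) (f : List Int → List Int) :
    (X ++ [y]).modify X.length f = X ++ [f y] := by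
  apply List.ext_getElem (by simp)
  intro j h1 h2
  rcases Nat.lt_or_ge j X.length with hj | hj
  · rw [List.getElem_modify, if_neg (by omega), List.getElem_append_left hj, List.getElem_append_left hj]
  · have hjeq : j = X.length := by simp at h1; omega
    subst hjeq
    rw [List.getElem_modify, if_pos rfl]
    rw [List.getElem_append_right (le_refl _), List.getElem_append_right (le_refl _)]
    simp

-- pv_modify_append_lt, through a whole fold of modifies at indices inside X
lemma pv_foldl_modify_append (is : List Nat) (X : List (List Int)) (y : List Int)
    (f : Nat → List Int → List Int) (h : ∀ i ∈ is, i < X.length) :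
    is.foldl (fun b i => b.modify i (f i)) (X ++ [y])
      = is.foldl (fun b i => b.modify i (f i)) X ++ [y] := by
  induction is generalizing X with
  | nil => simp
  | cons i is ih =>
      have hi : i < X.length := h i (by simp)
      simp only [List.foldl_cons, pv_modify_append_lt X y i hi (f i)]
      exact ih _ (by intro j hj; simpa using h j (by simp [hj]))

-- dealing: modifying bucket i with the i-th extension, for every i in order
lemma pv_deal (c : Nat → List Int) (G : Nat → List Int) (n : Nat) :
    (List.range n).foldl (fun bk i => bk.modify i (fun l => l ++ c i)) ((List.range n).map G)
      = (List.range n).map (fun i => G i ++ c i) := by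
  induction n with
  | zero => simp
  | succ n ih =>
      rw [List.range_succ]
      simp only [List.map_append, List.map_singleton, List.foldl_append, List.foldl_cons,
        List.foldl_nil]
      rw [pv_foldl_modify_append _ _ _ _ (by intro j hj; simpa using List.mem_range.mp hj)]
      rw [ih]
      have hmod := pv_modify_append_last (List.map (fun i => G i ++ c i) (List.range n)) (G n)
        (fun l => l ++ c n)
      rw [List.length_map, List.length_range] at hmod
      rw [hmod]

-- a contiguous range is the shift of range(0, T)
lemma pv_chunk (nd T block dev : Int) :
    (PySem.List.pyRange 0 T 1).map (fun i => nd * T * block + dev * T + i)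
      = PySem.List.pyRange ((nd * block + dev) * T) ((nd * block + dev) * T + T) 1 := by
  simp only [PySem.List.pyRange_one, List.map_map]
  have h1 : ((nd * block + dev) * T + T - (nd * block + dev) * T) = T - 0 := by ring
  rw [h1]
  apply List.map_congr_left
  intro k _
  simp only [Function.comp_apply]
  ring

-- the inner dev-loop of B, on buckets of the right shape
lemma pv_inner_deal (n : Nat) (c : Int → List Int) (G : Int → List Int) :
    (PySem.List.pyRange 0 (n : Int) 1).foldl
        (fun bk dev => bk.modify dev.toNat (fun l => l ++ c dev))
        ((PySem.List.pyRange 0 (n : Int) 1).map G)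
      = (PySem.List.pyRange 0 (n : Int) 1).map (fun dev => G dev ++ c dev) := by
  rw [PySem.List.pyRange_zero_natCast, List.foldl_map, List.map_map, List.map_map]
  simpa using pv_deal (fun i => c (i : Int)) (fun i => G (i : Int)) n

-- the whole block-loop of B builds, per device, the concatenation of its blocks' ranges
lemma pv_outer (T nd : Int) (n : Nat) (hn : nd = (n : Int)) (m : Nat) :
    (PySem.List.pyRange 0 (m : Int) 1).foldl (fun bk block =>
        (PySem.List.pyRange 0 nd 1).foldl (fun bk dev =>
          bk.modify dev.toNat
            (fun l => l ++ PySem.List.pyRange ((nd * block + dev) * T) ((nd * block + dev) * T + T) 1)) bk)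
      ((PySem.List.pyRange 0 nd 1).map (fun _ => ([] : List Int)))
      = (PySem.List.pyRange 0 nd 1).map (fun dev =>
          (PySem.List.pyRange 0 (m : Int) 1).flatMap
            (fun block => PySem.List.pyRange ((nd * block + dev) * T) ((nd * block + dev) * T + T) 1)) := by
  subst hn
  induction m with
  | zero => simp
  | succ m ih =>
      have hstep : ((m + 1 : Nat) : Int) = ((m : Int) + 1) := by push_cast; ring
      rw [hstep, PySem.List.pyRange_one_succ_right (by positivity), List.foldl_append]
      rw [ih, List.foldl_cons, List.foldl_nil]
      rw [pv_inner_deal n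
        (fun dev => PySem.List.pyRange ((↑n * ↑m + dev) * T) ((↑n * ↑m + dev) * T + T) 1)
        (fun dev => (PySem.List.pyRange 0 (m : Int) 1).flatMap
          (fun block => PySem.List.pyRange ((↑n * block + dev) * T) ((↑n * block + dev) * T + T) 1))]
      apply List.map_congr_left
      intro dev _
      rw [List.flatMap_append]
      simp

-- the two programs agree for any values of ndev and nblocks_per_device
lemma pv_core (T nd npd : Int) :
    ((PySem.List.pyRange 0 nd 1).foldl (fun interleaved dev =>
        (PySem.List.pyRange 0 npd 1).foldl (fun interleaved block =>
          let shift := nd * T * block + dev * T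
          (PySem.List.pyRange 0 T 1).foldl (fun interleaved i =>
            let idx := shift + i
            interleaved ++ [idx]) interleaved) interleaved) [])
      = ((PySem.List.pyRange 0 npd 1).foldl (fun bk block =>
          (PySem.List.pyRange 0 nd 1).foldl (fun bk dev =>
            let b := nd * block + dev
            bk.modify dev.toNat
              (fun l => l ++ PySem.List.pyRange (b * T) (b * T + T) 1)) bk)
          ((PySem.List.pyRange 0 nd 1).map (fun _ => ([] : List Int)))).flatMap (fun bucket => bucket) := by
  simp only
  by_cases hnd' : 0 < nd
  · obtain ⟨n, hn⟩ : ∃ n : Nat, nd = (n : Int) := ⟨nd.toNat, by omega⟩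
    simp only [PySem.List.foldl_append_singleton_eq_map, PySem.List.foldl_append_eq_flatMap]
    by_cases hnpd : 0 < npd
    · obtain ⟨m, hm⟩ : ∃ m : Nat, npd = (m : Int) := ⟨npd.toNat, by omega⟩
      rw [hm, pv_outer T nd n hn m, List.flatMap_map]
      simp only [List.nil_append]
      apply List.flatMap_congr
      intro dev _
      apply List.flatMap_congr
      intro block _
      exact pv_chunk nd T block dev
    · -- no blocks per device: both sides are empty
      have he : PySem.List.pyRange 0 npd 1 = [] := by
        simp [PySem.List.pyRange_one]
        omega
      rw [he]
      simp [List.flatMap_def]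
  · -- nd < 0: range(ndev) is empty, both sides are []
    have he : PySem.List.pyRange 0 nd 1 = [] := by
      simp [PySem.List.pyRange_one]
      omega
    rw [he]
    simp

-- ===== VERDICT (by name: the statement is the Claim_ definition above) =====
theorem local_block_cyclic_permutation_spec : Claim_equal_local_block_cyclic_permutation := by
  intro sc T nd _ _
  unfold Spec_local_block_cyclic_permutation local_block_cyclic_permutation local_block_cyclic_permutation_alt
  exact pv_core T nd (PySem.Int.floordiv (PySem.Int.floordiv sc T) nd)
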